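-- pv_equiv track=rewrite | github.com/tobe-honest/AlgorithmStudy | seungIl/week6/1447_G4_휴게소.py | check
-- ===== SOURCE A (Python) =====
-- def check(points, distance, n):
--     cnt = 0
--     for i in range(n + 1):
--         curr_point = points[i]
--         next_point = points[i + 1]
--         while curr_point + distance < next_point:
--             cnt += 1
--             curr_point += distance
--
--     return cnt
-- ===== SOURCE B (Python) =====
-- def check(points, distance, n):
--     # closed form per gap: stops needed between points[i] and points[i+1]
--     return sum(max(0, (points[i + 1] - points[i] - 1) // distance) for i in range(n + 1))
-- ===== Notes on version B (the rewrite author's own statement) =====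
-- stated objective: alternative
-- what changed: Replaces the inner while loop (one step per inserted stop) by the closed-form floor-division count max(0,(next-curr-1)//distance) per gap, summed in one pass.
-- outside the precondition, e.g. on check([5, 3], -1, 0): A returns 0, B returns 3; on check([3, 3], 0, 0): A returns 0, B raises ZeroDivisionError
import Mathlib
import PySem

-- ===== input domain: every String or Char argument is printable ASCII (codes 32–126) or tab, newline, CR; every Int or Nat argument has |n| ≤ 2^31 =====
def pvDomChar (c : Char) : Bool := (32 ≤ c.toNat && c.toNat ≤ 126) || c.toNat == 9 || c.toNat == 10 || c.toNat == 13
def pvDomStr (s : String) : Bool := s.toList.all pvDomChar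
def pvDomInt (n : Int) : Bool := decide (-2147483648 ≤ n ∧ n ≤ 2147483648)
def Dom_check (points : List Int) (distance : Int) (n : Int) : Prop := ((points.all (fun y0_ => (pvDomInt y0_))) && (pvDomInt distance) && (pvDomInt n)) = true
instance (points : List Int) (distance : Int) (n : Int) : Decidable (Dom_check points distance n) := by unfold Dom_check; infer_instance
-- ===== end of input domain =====

-- B replaces A's inner stepping while loop by a closed-form floor-division count per gap (alternative algorithm).


-- ===== PORT A =====
-- the 'while curr_point + distance < next_point' loop; the '0 < dist' guard only makes it
-- total (Python diverges there; Pre_check excludes distance ≤ 0)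
def checkWhile (curr next dist cnt : Int) : Int :=
  if h : curr + dist < next ∧ 0 < dist then checkWhile (curr + dist) next dist (cnt + 1)
  else cnt
termination_by (next - curr).toNat
decreasing_by omega

def check (points : List Int) (distance : Int) (n : Int) : Int :=
  (PySem.List.pyRange 0 (n + 1) 1).foldl (fun cnt i =>
    checkWhile (PySem.List.pyGetD points i 0) (PySem.List.pyGetD points (i + 1) 0) distance cnt) 0

-- ===== PORT B =====
def check_alt (points : List Int) (distance : Int) (n : Int) : Int :=
  ((PySem.List.pyRange 0 (n + 1) 1).map (fun i =>
    max 0 (PySem.Int.floordiv (PySem.List.pyGetD points (i + 1) 0 - PySem.List.pyGetD points i 0 - 1) distance))).sum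

-- ===== PRECONDITION & SPEC =====
-- Pre_ excludes (for 0 ≤ n only): n + 1 ≥ len(points), where A raises IndexError, and
-- distance ≤ 0, where A diverges whenever some gap exceeds distance and where it still
-- returns 0 vacuously B's floor division divides by zero or yields a different value (see cites).
def Pre_check (points : List Int) (distance : Int) (n : Int) : Prop :=
  (0 < distance ∧ n + 1 < (points.length : Int)) ∨ n < 0
instance (points : List Int) (distance : Int) (n : Int) : Decidable (Pre_check points distance n) := by unfold Pre_check; infer_instance

def pvWitness_check : List Int × Int × Int := ([0, 5], 2, 0)

def Spec_check (points : List Int) (distance : Int) (n : Int) (out : Int) : Prop := out = check_alt points distance n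
instance (points : List Int) (distance : Int) (n : Int) (out : Int) : Decidable (Spec_check points distance n out) := by unfold Spec_check; infer_instance

-- ===== CLAIM (what is proved, stated in full; the proofs are below) =====
def Claim_equal_check : Prop := ∀ (points : List Int) (distance : Int) (n : Int), Dom_check points distance n → Pre_check points distance n → Spec_check points distance n (check points distance n)

-- ===== LEMMAS AND PROOFS =====
theorem checkWhile_closed (d : Int) (hd : 0 < d) :
    ∀ (k : Nat) (c nx cnt : Int), (nx - c).toNat ≤ k →
      checkWhile c nx d cnt = cnt + max 0 (PySem.Int.floordiv (nx - c - 1) d) := by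
  intro k
  induction k with
  | zero =>
    intro c nx cnt hk
    rw [checkWhile]
    have hle : nx ≤ c := by omega
    have h0 : PySem.Int.floordiv (nx - c - 1) d < 1 := by
      rw [PySem.Int.floordiv_lt_iff_lt_mul hd]; omega
    have : ¬ (c + d < nx ∧ 0 < d) := by omega
    simp [this]; omega
  | succ k ih =>
    intro c nx cnt hk
    rw [checkWhile]
    by_cases h : c + d < nx
    · rw [dif_pos ⟨h, hd⟩, ih (c + d) nx (cnt + 1) (by omega)]
      set m := PySem.Int.floordiv (nx - c - 1) d with hm
      have hb : m * d ≤ nx - c - 1 ∧ nx - c - 1 < (m + 1) * d := by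
        have := (PySem.Int.floordiv_eq_iff_of_pos hd).mp hm.symm
        exact this
      have h1 : 1 ≤ m := by
        rw [hm, PySem.Int.le_floordiv_iff_mul_le hd]; omega
      have h2 : PySem.Int.floordiv (nx - (c + d) - 1) d = m - 1 := by
        rw [PySem.Int.floordiv_eq_iff_of_pos hd]
        constructor
        · have : (m - 1) * d = m * d - d := by ring
          omega
        · have : (m - 1 + 1) * d = (m + 1) * d - d := by ring
          omega
      rw [h2]
      omega
    · rw [dif_neg (by omega)]
      have h0 : PySem.Int.floordiv (nx - c - 1) d < 1 := by
        rw [PySem.Int.floordiv_lt_iff_lt_mul hd]; omega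
      omega

theorem foldl_checkWhile (d : Int) (hd : 0 < d) (A B : Int → Int) :
    ∀ (l : List Int) (cnt : Int),
      l.foldl (fun cnt i => checkWhile (A i) (B i) d cnt) cnt
        = cnt + (l.map (fun i => max 0 (PySem.Int.floordiv (B i - A i - 1) d))).sum := by
  intro l
  induction l with
  | nil => intro cnt; simp
  | cons x xs ih =>
    intro cnt
    simp only [List.foldl_cons, List.map_cons, List.sum_cons]
    rw [checkWhile_closed d hd (B x - A x).toNat (A x) (B x) cnt le_rfl, ih]
    ring

-- ===== VERDICT (by name: the statement is the Claim_ definition above) =====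
theorem check_spec : Claim_equal_check := by
  intro points distance n _ hpre
  unfold Spec_check check check_alt
  rcases hpre with ⟨hd, _⟩ | hn
  · rw [foldl_checkWhile distance hd
      (fun i => PySem.List.pyGetD points i 0) (fun i => PySem.List.pyGetD points (i + 1) 0)]
    simp
  · rw [PySem.List.pyRange_one_eq_nil (by omega)]
    simp
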